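-- pv_equiv track=rewrite | github.com/SenaShibanuma/senasJanAI | src/transformer/investigate_state.py | _convert_hand_to_str
-- ===== SOURCE A (Python) =====
-- def _convert_hand_to_str(hand_136):
--     m, p, s, z = [], [], [], []
--     jihai_order = {108: 'E', 112: 'S', 116: 'W', 120: 'N', 124: 'H', 128: 'G', 132: 'C'}
--     for tile_id in sorted(hand_136):
--         tile_34 = tile_id // 4
--         if tile_34 < 9: m.append(str((tile_34 % 9) + 1))
--         elif tile_34 < 18: p.append(str((tile_34 % 9) + 1))
--         elif tile_34 < 27: s.append(str((tile_34 % 9) + 1))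
--         else:
--             base_id = tile_34 * 4
--             z.append((base_id, jihai_order.get(base_id, '')))
--     z.sort()
--     z_str = "".join([val for key, val in z])
--     hand_parts = []
--     if m: hand_parts.append("".join(m) + "m")
--     if p: hand_parts.append("".join(p) + "p")
--     if s: hand_parts.append("".join(s) + "s")
--     if z_str: hand_parts.append(z_str)
--     return "".join(hand_parts)
-- ===== SOURCE B (Python) =====
-- def _convert_hand_to_str(hand_136):
--     counts = {}
--     for t in hand_136:
--         f = t // 4
--         counts[f] = counts.get(f, 0) + 1
--     letters = {27: 'E', 28: 'S', 29: 'W', 30: 'N', 31: 'H', 32: 'G', 33: 'C'}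
--     m = p = s = z = ""
--     for f in sorted(counts):
--         chunk = (letters.get(f, '') if f >= 27 else str(f % 9 + 1)) * counts[f]
--         if f < 9:
--             m += chunk
--         elif f < 18:
--             p += chunk
--         elif f < 27:
--             s += chunk
--         else:
--             z += chunk
--     out = ""
--     if m:
--         out += m + "m"
--     if p:
--         out += p + "p"
--     if s:
--         out += s + "s"
--     return out + z
-- ===== Notes on version B (the rewrite author's own statement) =====
-- stated objective: alternative
-- what changed: A sorts the whole hand and dispatches every tile through one branched scan into four suit lists (plus a second z.sort); B never builds per-tile lists: it counts faces in a dictionary in one unsorted pass, sorts only the distinct faces, and emits each face once as its digit/letter repeated count times by string multiplication.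
import Mathlib
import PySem

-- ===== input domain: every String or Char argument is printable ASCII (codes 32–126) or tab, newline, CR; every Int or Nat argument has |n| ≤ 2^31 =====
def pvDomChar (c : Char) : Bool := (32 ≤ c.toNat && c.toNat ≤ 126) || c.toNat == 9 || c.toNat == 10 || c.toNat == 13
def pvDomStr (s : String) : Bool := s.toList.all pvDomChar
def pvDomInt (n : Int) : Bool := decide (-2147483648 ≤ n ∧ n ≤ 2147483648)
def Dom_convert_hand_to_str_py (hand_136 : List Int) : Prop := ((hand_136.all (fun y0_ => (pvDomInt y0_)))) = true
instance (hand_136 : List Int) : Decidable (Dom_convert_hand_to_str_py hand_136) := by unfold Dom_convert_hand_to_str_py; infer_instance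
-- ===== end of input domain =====

-- B replaces A's sort-everything-then-dispatch loop (four suit lists plus a second z.sort) by a
-- count dictionary built in one unsorted pass, a sort of only the DISTINCT faces, and string
-- repetition of each face's count; same worst-case cost (objective: alternative).

-- ===== PORT A =====
def jihaiOrderA : PySem.Dict Int String :=
  PySem.Dict.ofList [(108, "E"), (112, "S"), (116, "W"), (120, "N"), (124, "H"), (128, "G"), (132, "C")]

def stepA (acc : List String × List String × List String × List (Int × String)) (tile_id : Int) :
    List String × List String × List String × List (Int × String) :=
  let tile_34 := PySem.Int.floordiv tile_id 4
  if tile_34 < 9 then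
    (acc.1 ++ [PySem.Int.toStr (PySem.Int.mod tile_34 9 + 1)], acc.2.1, acc.2.2.1, acc.2.2.2)
  else if tile_34 < 18 then
    (acc.1, acc.2.1 ++ [PySem.Int.toStr (PySem.Int.mod tile_34 9 + 1)], acc.2.2.1, acc.2.2.2)
  else if tile_34 < 27 then
    (acc.1, acc.2.1, acc.2.2.1 ++ [PySem.Int.toStr (PySem.Int.mod tile_34 9 + 1)], acc.2.2.2)
  else
    let base_id := tile_34 * 4
    (acc.1, acc.2.1, acc.2.2.1, acc.2.2.2 ++ [(base_id, PySem.Dict.getD jihaiOrderA base_id "")])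

def convert_hand_to_str_py (hand_136 : List Int) : String :=
  let st := (PySem.List.sorted hand_136 (fun x => x)).foldl stepA ([], [], [], [])
  let z := PySem.List.sorted2 st.2.2.2 (fun pr => pr.1) (fun pr => pr.2)
  let z_str := PySem.Str.join "" (z.map (fun pr => pr.2))
  let hand_parts : List String :=
    (if st.1 ≠ [] then [PySem.Str.join "" st.1 ++ "m"] else []) ++
    (if st.2.1 ≠ [] then [PySem.Str.join "" st.2.1 ++ "p"] else []) ++
    (if st.2.2.1 ≠ [] then [PySem.Str.join "" st.2.2.1 ++ "s"] else []) ++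
    (if z_str ≠ "" then [z_str] else [])
  PySem.Str.join "" hand_parts

-- ===== PORT B =====
def lettersB : PySem.Dict Int String :=
  PySem.Dict.ofList [(27, "E"), (28, "S"), (29, "W"), (30, "N"), (31, "H"), (32, "G"), (33, "C")]

-- Python's  s * n  on strings (a non-positive n gives "")
def pyStrMul (s : String) (n : Int) : String :=
  PySem.Str.join "" (List.replicate n.toNat s)

-- the chunk one distinct face contributes:  (letters.get(f,'') if f >= 27 else str(f%9+1)) * counts[f]
def chunkB (counts : PySem.Dict Int Int) (f : Int) : String :=
  pyStrMul (if 27 ≤ f then PySem.Dict.getD lettersB f "" else PySem.Int.toStr (PySem.Int.mod f 9 + 1))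
    (PySem.Dict.getD counts f 0)

def stepB (counts : PySem.Dict Int Int) (acc : String × String × String × String) (f : Int) :
    String × String × String × String :=
  let chunk := chunkB counts f
  if f < 9 then (acc.1 ++ chunk, acc.2.1, acc.2.2.1, acc.2.2.2)
  else if f < 18 then (acc.1, acc.2.1 ++ chunk, acc.2.2.1, acc.2.2.2)
  else if f < 27 then (acc.1, acc.2.1, acc.2.2.1 ++ chunk, acc.2.2.2)
  else (acc.1, acc.2.1, acc.2.2.1, acc.2.2.2 ++ chunk)

def convert_hand_to_str_py_alt (hand_136 : List Int) : String :=
  let counts := hand_136.foldl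
    (fun d t => let f := PySem.Int.floordiv t 4; d.insert f (d.getD f 0 + 1)) PySem.Dict.empty
  let st := (PySem.List.sorted (PySem.Dict.keys counts) (fun x => x)).foldl (stepB counts) ("", "", "", "")
  let out := ""
  let out := if st.1 ≠ "" then out ++ (st.1 ++ "m") else out
  let out := if st.2.1 ≠ "" then out ++ (st.2.1 ++ "p") else out
  let out := if st.2.2.1 ≠ "" then out ++ (st.2.2.1 ++ "s") else out
  out ++ st.2.2.2

-- ===== PRECONDITION & SPEC =====
def Spec_convert_hand_to_str_py (hand_136 : List Int) (out : String) : Prop := out = convert_hand_to_str_py_alt hand_136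
instance (hand_136 : List Int) (out : String) : Decidable (Spec_convert_hand_to_str_py hand_136 out) := by unfold Spec_convert_hand_to_str_py; infer_instance

-- ===== CLAIM (what is proved, stated in full; the proofs are below) =====
def Claim_equal_convert_hand_to_str_py : Prop := ∀ (hand_136 : List Int), Dom_convert_hand_to_str_py hand_136 → Spec_convert_hand_to_str_py hand_136 (convert_hand_to_str_py hand_136)

-- ===== LEMMAS AND PROOFS =====

-- characterization of A's dispatching fold: four filtered-and-mapped sublists
lemma foldA_char (l : List Int) : ∀ (m p s z : _),
    l.foldl stepA (m, p, s, z) =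
      (m ++ (((l.map (fun t => PySem.Int.floordiv t 4)).filter (fun f => decide (f < 9))).map
          (fun f => PySem.Int.toStr (PySem.Int.mod f 9 + 1))),
       p ++ (((l.map (fun t => PySem.Int.floordiv t 4)).filter (fun f => decide (9 ≤ f ∧ f < 18))).map
          (fun f => PySem.Int.toStr (PySem.Int.mod f 9 + 1))),
       s ++ (((l.map (fun t => PySem.Int.floordiv t 4)).filter (fun f => decide (18 ≤ f ∧ f < 27))).map
          (fun f => PySem.Int.toStr (PySem.Int.mod f 9 + 1))),
       z ++ (((l.map (fun t => PySem.Int.floordiv t 4)).filter (fun f => decide (27 ≤ f))).map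
          (fun f => (f * 4, PySem.Dict.getD jihaiOrderA (f * 4) "")))) := by
  induction l with
  | nil => simp
  | cons t l ih =>
    intro m p s z
    rw [List.foldl_cons]
    simp only [stepA, List.map_cons]
    by_cases h1 : PySem.Int.floordiv t 4 < 9
    · rw [if_pos h1, ih,
          List.filter_cons_of_pos (by simp only [decide_eq_true_eq]; omega),
          List.filter_cons_of_neg (p := fun f => decide (9 ≤ f ∧ f < 18)) (by simp only [decide_eq_true_eq]; omega),
          List.filter_cons_of_neg (p := fun f => decide (18 ≤ f ∧ f < 27)) (by simp only [decide_eq_true_eq]; omega),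
          List.filter_cons_of_neg (p := fun f => decide (27 ≤ f)) (by simp only [decide_eq_true_eq]; omega)]
      simp
    · by_cases h2 : PySem.Int.floordiv t 4 < 18
      · rw [if_neg h1, if_pos h2, ih,
            List.filter_cons_of_neg (p := fun f => decide (f < 9)) (by simp only [decide_eq_true_eq]; omega),
            List.filter_cons_of_pos (p := fun f => decide (9 ≤ f ∧ f < 18)) (by simp only [decide_eq_true_eq]; omega),
            List.filter_cons_of_neg (p := fun f => decide (18 ≤ f ∧ f < 27)) (by simp only [decide_eq_true_eq]; omega),
            List.filter_cons_of_neg (p := fun f => decide (27 ≤ f)) (by simp only [decide_eq_true_eq]; omega)]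
        simp
      · by_cases h3 : PySem.Int.floordiv t 4 < 27
        · rw [if_neg h1, if_neg h2, if_pos h3, ih,
              List.filter_cons_of_neg (p := fun f => decide (f < 9)) (by simp only [decide_eq_true_eq]; omega),
              List.filter_cons_of_neg (p := fun f => decide (9 ≤ f ∧ f < 18)) (by simp only [decide_eq_true_eq]; omega),
              List.filter_cons_of_pos (p := fun f => decide (18 ≤ f ∧ f < 27)) (by simp only [decide_eq_true_eq]; omega),
              List.filter_cons_of_neg (p := fun f => decide (27 ≤ f)) (by simp only [decide_eq_true_eq]; omega)]
          simp
        · rw [if_neg h1, if_neg h2, if_neg h3, ih,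
              List.filter_cons_of_neg (p := fun f => decide (f < 9)) (by simp only [decide_eq_true_eq]; omega),
              List.filter_cons_of_neg (p := fun f => decide (9 ≤ f ∧ f < 18)) (by simp only [decide_eq_true_eq]; omega),
              List.filter_cons_of_neg (p := fun f => decide (18 ≤ f ∧ f < 27)) (by simp only [decide_eq_true_eq]; omega),
              List.filter_cons_of_pos (p := fun f => decide (27 ≤ f)) (by simp only [decide_eq_true_eq]; omega)]
          simp

-- an insertion-sort fold over an already-ordered list is the identity
lemma foldl_insertBy_id {α : Type} (before : α → α → Bool) :
    ∀ (xs acc : List α), (∀ x ∈ xs, ∀ a ∈ acc, before x a = false) →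
      xs.Pairwise (fun a b => before b a = false) →
      xs.foldl (fun acc x => PySem.List.insertBy before x acc) acc = acc ++ xs := by
  intro xs
  induction xs with
  | nil => simp
  | cons x t ih =>
    intro acc hacc hpw
    rw [List.foldl_cons, PySem.List.insertBy_of_forall_not_before _ _ _ (hacc x (by simp))]
    rw [ih (acc ++ [x])]
    · simp
    · intro y hy a ha
      rcases List.mem_append.mp ha with ha | ha
      · exact hacc y (by simp [hy]) a ha
      · simp at ha; subst ha
        exact (List.pairwise_cons.mp hpw).1 y hy
    · exact (List.pairwise_cons.mp hpw).2

-- the honor-tile lookups agree: A keys by base_id = face*4, B keys by the face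
lemma getD_jihai_eq (f : Int) :
    PySem.Dict.getD jihaiOrderA (f * 4) "" = PySem.Dict.getD lettersB f "" := by
  by_cases h27 : f = 27; · subst h27; rfl
  by_cases h28 : f = 28; · subst h28; rfl
  by_cases h29 : f = 29; · subst h29; rfl
  by_cases h30 : f = 30; · subst h30; rfl
  by_cases h31 : f = 31; · subst h31; rfl
  by_cases h32 : f = 32; · subst h32; rfl
  by_cases h33 : f = 33; · subst h33; rfl
  simp [jihaiOrderA, lettersB, PySem.Dict.ofList, PySem.Dict.update, PySem.Dict.getD_eq_get?_getD,
        PySem.Dict.get?_insert, PySem.Dict.get?_empty,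
        show f * 4 ≠ 108 by omega, show f * 4 ≠ 112 by omega, show f * 4 ≠ 116 by omega,
        show f * 4 ≠ 120 by omega, show f * 4 ≠ 124 by omega, show f * 4 ≠ 128 by omega,
        show f * 4 ≠ 132 by omega,
        h27, h28, h29, h30, h31, h32, h33]

lemma join_nil_flatten (ls : List (List Char)) : PySem.Chars.join [] ls = ls.flatten := by
  induction ls with
  | nil => rfl
  | cons h t ih =>
    cases t with
    | nil => simp [PySem.Chars.join, List.intercalate]
    | cons h2 t2 =>
      simp only [PySem.Chars.join, List.intercalate, List.intersperse] at *
      simp_all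

lemma digit_chars_ne_nil (f : Int) : PySem.Int.toChars (f % 9 + 1) ≠ [] := by
  have h0 : 0 ≤ f % 9 := Int.emod_nonneg f (by norm_num)
  have h9 : f % 9 < 9 := Int.emod_lt_of_pos f (by norm_num)
  set n := f % 9 with hn
  interval_cases n <;> decide

lemma join_digits_eq_empty_iff (fl : List Int) :
    (PySem.Str.join "" (fl.map (fun f => PySem.Int.toStr (PySem.Int.mod f 9 + 1))) = "") ↔ fl = [] := by
  constructor
  · intro h
    cases fl with
    | nil => rfl
    | cons f t =>
      exfalso
      have := congrArg String.toList h
      simp [PySem.Str.toList_join, join_nil_flatten, PySem.Int.toList_toStr] at this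
      exact digit_chars_ne_nil f this.1
  · intro h; subst h; rfl

lemma floordiv4_mono {a b : Int} (h : a ≤ b) :
    PySem.Int.floordiv a 4 ≤ PySem.Int.floordiv b 4 := by
  rw [PySem.Int.floordiv_eq_ediv_of_pos (by norm_num), PySem.Int.floordiv_eq_ediv_of_pos (by norm_num)]
  exact Int.ediv_le_ediv (by norm_num) h

-- joining with an empty separator peels off the head string
lemma join_cons (c : String) (cs : List String) :
    PySem.Str.join "" (c :: cs) = c ++ PySem.Str.join "" cs := by
  apply String.toList_inj.mp
  simp [PySem.Str.toList_join, join_nil_flatten]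

-- a ≤-sorted list whose minimum is k is: all copies of k, then everything else
lemma min_prefix : ∀ (N : List Int) (k : Int), N.Pairwise (· ≤ ·) → (∀ x ∈ N, k ≤ x) →
    N = List.replicate (N.count k) k ++ N.filter (fun x => decide (x ≠ k)) := by
  intro N
  induction N with
  | nil => intro k _ _; simp
  | cons x T ih =>
    intro k hpw hmin
    by_cases hx : x = k
    · subst hx
      rw [List.count_cons_self, List.replicate_succ,
          List.filter_cons_of_neg (by simp)]
      simpa using ih x (List.Pairwise.of_cons hpw) (fun y hy => (List.pairwise_cons.mp hpw).1 y hy)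
    · have hall : ∀ y ∈ x :: T, k < y := by
        intro y hy
        rcases List.mem_cons.mp hy with rfl | hy
        · exact lt_of_le_of_ne (hmin y List.mem_cons_self) (Ne.symm hx)
        · exact lt_of_lt_of_le
            (lt_of_le_of_ne (hmin x List.mem_cons_self) (Ne.symm hx))
            ((List.pairwise_cons.mp hpw).1 y hy)
      have hnm : k ∉ x :: T := fun hk => lt_irrefl k (hall k hk)
      rw [List.count_eq_zero_of_not_mem hnm, List.replicate_zero, List.nil_append,
          List.filter_eq_self.mpr (fun y hy => by
            have := hall y hy; simp only [decide_eq_true_eq]; omega)]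

-- a ≤-sorted list is the concatenation, over its distinct values in increasing order,
-- of each value repeated its multiplicity
lemma sorted_grouped : ∀ (K N : List Int), N.Pairwise (· ≤ ·) → K.Pairwise (· < ·) →
    (∀ x, x ∈ K ↔ x ∈ N) → N = K.flatMap (fun k => List.replicate (N.count k) k) := by
  intro K
  induction K with
  | nil =>
    intro N _ _ hmem
    simp only [List.flatMap_nil]
    exact List.eq_nil_iff_forall_not_mem.mpr (fun x hx => by simpa using (hmem x).mpr hx)
  | cons k K' ih =>
    intro N hN hK hmem
    have hK' := List.pairwise_cons.mp hK
    have hmin : ∀ x ∈ N, k ≤ x := by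
      intro x hx
      rcases List.mem_cons.mp ((hmem x).mpr hx) with rfl | hxK'
      · exact le_refl x
      · exact le_of_lt (hK'.1 x hxK')
    have h1 := min_prefix N k hN hmin
    have hmem' : ∀ x, x ∈ K' ↔ x ∈ N.filter (fun x => decide (x ≠ k)) := by
      intro x
      constructor
      · intro hx
        have hkx := hK'.1 x hx
        have hxN : x ∈ N := (hmem x).mp (List.mem_cons_of_mem _ hx)
        simp only [List.mem_filter, decide_eq_true_eq]
        exact ⟨hxN, by omega⟩
      · intro hx
        obtain ⟨hxN, hxk⟩ := by simpa only [List.mem_filter, decide_eq_true_eq] using hx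
        rcases List.mem_cons.mp ((hmem x).mpr hxN) with rfl | h
        · exact absurd rfl hxk
        · exact h
    have ih' := ih (N.filter (fun x => decide (x ≠ k))) (hN.filter _) hK'.2 hmem'
    have hcnt : ∀ j ∈ K', (N.filter (fun x => decide (x ≠ k))).count j = N.count j := by
      intro j hj
      have hjk := hK'.1 j hj
      exact List.count_filter (by simp only [decide_eq_true_eq]; omega)
    rw [List.flatMap_cons]
    conv_lhs => rw [h1]
    congr 1
    rw [ih', List.flatMap_def, List.flatMap_def]
    congr 1
    exact List.map_congr_left (fun j hj => by rw [hcnt j hj])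

-- characterization of B's fold over the distinct faces: four filtered chunk joins
lemma foldB_char (counts : PySem.Dict Int Int) (l : List Int) : ∀ (m p s z : String),
    l.foldl (stepB counts) (m, p, s, z) =
      (m ++ PySem.Str.join "" ((l.filter (fun f => decide (f < 9))).map (chunkB counts)),
       p ++ PySem.Str.join "" ((l.filter (fun f => decide (9 ≤ f ∧ f < 18))).map (chunkB counts)),
       s ++ PySem.Str.join "" ((l.filter (fun f => decide (18 ≤ f ∧ f < 27))).map (chunkB counts)),
       z ++ PySem.Str.join "" ((l.filter (fun f => decide (27 ≤ f))).map (chunkB counts))) := by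
  induction l with
  | nil => intro m p s z; simp [PySem.Str.join]
  | cons f l ih =>
    intro m p s z
    rw [List.foldl_cons]
    simp only [stepB]
    by_cases h1 : f < 9
    · rw [if_pos h1,
          List.filter_cons_of_pos (by simp only [decide_eq_true_eq]; omega),
          List.filter_cons_of_neg (p := fun f => decide (9 ≤ f ∧ f < 18)) (by simp only [decide_eq_true_eq]; omega),
          List.filter_cons_of_neg (p := fun f => decide (18 ≤ f ∧ f < 27)) (by simp only [decide_eq_true_eq]; omega),
          List.filter_cons_of_neg (p := fun f => decide (27 ≤ f)) (by simp only [decide_eq_true_eq]; omega)]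
      rw [ih]
      simp [join_cons, String.append_assoc]
    · by_cases h2 : f < 18
      · rw [if_neg h1, if_pos h2,
            List.filter_cons_of_neg (p := fun f => decide (f < 9)) (by simp only [decide_eq_true_eq]; omega),
            List.filter_cons_of_pos (p := fun f => decide (9 ≤ f ∧ f < 18)) (by simp only [decide_eq_true_eq]; omega),
            List.filter_cons_of_neg (p := fun f => decide (18 ≤ f ∧ f < 27)) (by simp only [decide_eq_true_eq]; omega),
            List.filter_cons_of_neg (p := fun f => decide (27 ≤ f)) (by simp only [decide_eq_true_eq]; omega)]
        rw [ih]
        simp [join_cons, String.append_assoc]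
      · by_cases h3 : f < 27
        · rw [if_neg h1, if_neg h2, if_pos h3,
              List.filter_cons_of_neg (p := fun f => decide (f < 9)) (by simp only [decide_eq_true_eq]; omega),
              List.filter_cons_of_neg (p := fun f => decide (9 ≤ f ∧ f < 18)) (by simp only [decide_eq_true_eq]; omega),
              List.filter_cons_of_pos (p := fun f => decide (18 ≤ f ∧ f < 27)) (by simp only [decide_eq_true_eq]; omega),
              List.filter_cons_of_neg (p := fun f => decide (27 ≤ f)) (by simp only [decide_eq_true_eq]; omega)]
          rw [ih]
          simp [join_cons, String.append_assoc]
        · rw [if_neg h1, if_neg h2, if_neg h3,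
              List.filter_cons_of_neg (p := fun f => decide (f < 9)) (by simp only [decide_eq_true_eq]; omega),
              List.filter_cons_of_neg (p := fun f => decide (9 ≤ f ∧ f < 18)) (by simp only [decide_eq_true_eq]; omega),
              List.filter_cons_of_neg (p := fun f => decide (18 ≤ f ∧ f < 27)) (by simp only [decide_eq_true_eq]; omega),
              List.filter_cons_of_pos (p := fun f => decide (27 ≤ f)) (by simp only [decide_eq_true_eq]; omega)]
          rw [ih]
          simp [join_cons, String.append_assoc]

-- flatten of a flatMap distributes
lemma flatten_flatMap_char (l : List Int) (h : Int → List (List Char)) :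
    (l.flatMap h).flatten = (l.map (fun k => (h k).flatten)).flatten := by
  rw [List.flatMap_def, List.flatten_flatten, List.map_map]
  rfl

-- the central grouping step: a per-element join over the sorted-with-repetitions list equals
-- the per-distinct-value join of repeated chunks
lemma grouped_join (M K : List Int) (P : Int → Bool) (g : Int → String)
    (hM : M.Pairwise (· ≤ ·)) (hK : K.Pairwise (· < ·)) (hmem : ∀ x, x ∈ K ↔ x ∈ M) :
    PySem.Str.join "" ((M.filter P).map g)
      = PySem.Str.join "" ((K.filter P).map (fun k => pyStrMul (g k) ((M.count k : Int)))) := by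
  have hgr : M.filter P = (K.filter P).flatMap (fun k => List.replicate (M.count k) k) := by
    have h0 := sorted_grouped (K.filter P) (M.filter P) (hM.filter P) (hK.filter P)
      (fun x => by
        simp only [List.mem_filter]
        exact and_congr_left (fun _ => hmem x))
    rw [h0, List.flatMap_def, List.flatMap_def]
    congr 1
    refine List.map_congr_left (fun k hk => ?_)
    rw [List.count_filter (List.mem_filter.mp hk).2]
  apply String.toList_inj.mp
  simp only [PySem.Str.toList_join, List.map_map, show ("" : String).toList = [] from rfl,
    join_nil_flatten]
  rw [hgr, List.map_flatMap]
  have hrep : ∀ k : Int,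
      (List.replicate (M.count k) k).map (fun f => (g f).toList) =
        List.replicate (M.count k) (g k).toList := fun k => List.map_replicate
  have hmul : ∀ k : Int,
      (String.toList ∘ (fun k => pyStrMul (g k) ((M.count k : Int)))) k =
        (List.replicate (M.count k) (g k).toList).flatten := by
    intro k
    simp [pyStrMul, PySem.Str.toList_join, join_nil_flatten, List.map_replicate]
  calc ((K.filter P).flatMap fun k => (List.replicate (M.count k) k).map (fun f => (g f).toList)).flatten
      = ((K.filter P).flatMap fun k => List.replicate (M.count k) (g k).toList).flatten := by
        rw [List.flatMap_def, List.flatMap_def,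
          List.map_congr_left (l := K.filter P) (fun k _ => hrep k)]
    _ = ((K.filter P).map fun k => (List.replicate (M.count k) (g k).toList).flatten).flatten :=
        flatten_flatMap_char _ _
    _ = ((K.filter P).map (String.toList ∘ fun k => pyStrMul (g k) ((M.count k : Int)))).flatten := by
        rw [List.map_congr_left (l := K.filter P) (fun k _ => hmul k)]

-- ===== VERDICT (by name: the statement is the Claim_ definition above) =====
set_option maxHeartbeats 2000000 in
theorem convert_hand_to_str_py_spec : Claim_equal_convert_hand_to_str_py := by
  intro hand _
  unfold Spec_convert_hand_to_str_py convert_hand_to_str_py convert_hand_to_str_py_alt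
  simp only [foldA_char, List.nil_append]
  -- B's count dictionary is the counter of the (unsorted) face list
  have hcounts : (hand.foldl
      (fun d t => let f := PySem.Int.floordiv t 4; d.insert f (d.getD f 0 + 1)) PySem.Dict.empty)
      = PySem.Dict.counter (hand.map (fun t => PySem.Int.floordiv t 4)) := by
    rw [← PySem.Dict.foldl_insert_getD_add_one_eq_counter, List.foldl_map]
  rw [hcounts, PySem.Dict.keys_counter]
  set facesB := hand.map (fun t => PySem.Int.floordiv t 4) with hfacesB
  set M := (PySem.List.sorted hand (fun x => x)).map (fun t => PySem.Int.floordiv t 4) with hM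
  set K := PySem.List.sorted (PySem.Set.ofList facesB) (fun x => x) with hK
  rw [foldB_char]
  have hMpw : M.Pairwise (· ≤ ·) :=
    List.Pairwise.map _ (fun a b hab => floordiv4_mono hab) (PySem.List.sorted_pairwise hand (fun x => x))
  have hKpw : K.Pairwise (· < ·) := PySem.List.sorted_ofList_pairwise_lt facesB
  have hperm : M.Perm facesB := List.Perm.map _ (PySem.List.sorted_perm hand (fun x => x) false)
  have hmemKM : ∀ x, x ∈ K ↔ x ∈ M := by
    intro x
    rw [hK, PySem.List.mem_sorted, PySem.Set.mem_ofList]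
    exact (hperm.mem_iff).symm
  have hcnt : ∀ f : Int, PySem.Dict.getD (PySem.Dict.counter facesB) f 0 = ((M.count f : Nat) : Int) := by
    intro f
    rw [PySem.Dict.getD_counter, hperm.count_eq]
  -- the four per-suit string equalities
  have e1 : PySem.Str.join "" ((K.filter (fun f => decide (f < 9))).map (chunkB (PySem.Dict.counter facesB)))
      = PySem.Str.join "" ((M.filter (fun f => decide (f < 9))).map (fun f => PySem.Int.toStr (PySem.Int.mod f 9 + 1))) := by
    rw [grouped_join M K _ (fun f => PySem.Int.toStr (PySem.Int.mod f 9 + 1)) hMpw hKpw hmemKM]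
    congr 1
    refine List.map_congr_left (fun f hf => ?_)
    have hf9 : f < 9 := by simpa using (List.mem_filter.mp hf).2
    simp only [chunkB, hcnt]
    rw [if_neg (by omega)]
  have e2 : PySem.Str.join "" ((K.filter (fun f => decide (9 ≤ f ∧ f < 18))).map (chunkB (PySem.Dict.counter facesB)))
      = PySem.Str.join "" ((M.filter (fun f => decide (9 ≤ f ∧ f < 18))).map (fun f => PySem.Int.toStr (PySem.Int.mod f 9 + 1))) := by
    rw [grouped_join M K _ (fun f => PySem.Int.toStr (PySem.Int.mod f 9 + 1)) hMpw hKpw hmemKM]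
    congr 1
    refine List.map_congr_left (fun f hf => ?_)
    have hf' : 9 ≤ f ∧ f < 18 := by simpa using (List.mem_filter.mp hf).2
    simp only [chunkB, hcnt]
    rw [if_neg (by omega)]
  have e3 : PySem.Str.join "" ((K.filter (fun f => decide (18 ≤ f ∧ f < 27))).map (chunkB (PySem.Dict.counter facesB)))
      = PySem.Str.join "" ((M.filter (fun f => decide (18 ≤ f ∧ f < 27))).map (fun f => PySem.Int.toStr (PySem.Int.mod f 9 + 1))) := by
    rw [grouped_join M K _ (fun f => PySem.Int.toStr (PySem.Int.mod f 9 + 1)) hMpw hKpw hmemKM]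
    congr 1
    refine List.map_congr_left (fun f hf => ?_)
    have hf' : 18 ≤ f ∧ f < 27 := by simpa using (List.mem_filter.mp hf).2
    simp only [chunkB, hcnt]
    rw [if_neg (by omega)]
  have e4 : PySem.Str.join "" ((K.filter (fun f => decide (27 ≤ f))).map (chunkB (PySem.Dict.counter facesB)))
      = PySem.Str.join "" ((M.filter (fun f => decide (27 ≤ f))).map (fun f => PySem.Dict.getD lettersB f "")) := by
    rw [grouped_join M K _ (fun f => PySem.Dict.getD lettersB f "") hMpw hKpw hmemKM]
    congr 1
    refine List.map_congr_left (fun f hf => ?_)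
    have hf' : 27 ≤ f := by simpa using (List.mem_filter.mp hf).2
    simp only [chunkB, hcnt]
    rw [if_pos (by omega)]
  rw [e1, e2, e3, e4]
  -- A's z list is already sorted, so sorted2 is the identity on it
  have hzid : PySem.List.sorted2
      ((M.filter (fun f => decide (27 ≤ f))).map (fun f => (f * 4, PySem.Dict.getD jihaiOrderA (f * 4) "")))
      (fun pr => pr.1) (fun pr => pr.2) =
      (M.filter (fun f => decide (27 ≤ f))).map (fun f => (f * 4, PySem.Dict.getD jihaiOrderA (f * 4) "")) := by
    have hpw : (M.filter (fun f => decide (27 ≤ f))).Pairwise (· ≤ ·) := hMpw.filter _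
    simp only [PySem.List.sorted2]
    apply foldl_insertBy_id
    · simp
    · refine List.Pairwise.map _ ?_ hpw
      intro a b hab
      by_cases heq : a = b
      · subst heq; simp
      · have hlt : a * 4 < b * 4 := by omega
        simp
        exact ⟨by omega, fun hba => absurd hba (by omega)⟩
  rw [hzid]
  -- the two honor strings agree
  have hhon : ((M.filter (fun f => decide (27 ≤ f))).map (fun f => (f * 4, PySem.Dict.getD jihaiOrderA (f * 4) ""))).map (fun pr => pr.2) =
      (M.filter (fun f => decide (27 ≤ f))).map (fun f => PySem.Dict.getD lettersB f "") := by
    rw [List.map_map]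
    exact List.map_congr_left (fun f _ => getD_jihai_eq f)
  rw [hhon]
  -- nonemptiness tests agree per suit
  have hiff : ∀ (fl : List Int),
      ((fl.map (fun f => PySem.Int.toStr (PySem.Int.mod f 9 + 1)) ≠ []) ↔
        (PySem.Str.join "" (fl.map (fun f => PySem.Int.toStr (PySem.Int.mod f 9 + 1))) ≠ "")) := by
    intro fl
    rw [not_iff_not, join_digits_eq_empty_iff, List.map_eq_nil_iff]
  simp only [hiff]
  clear hzid hhon hiff e1 e2 e3 e4 hcnt hmemKM hperm hKpw hMpw hcounts hK hM hfacesB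
  set s1 := PySem.Str.join "" ((M.filter (fun f => decide (f < 9))).map (fun f => PySem.Int.toStr (PySem.Int.mod f 9 + 1))) with hs1
  set s2 := PySem.Str.join "" ((M.filter (fun f => decide (9 ≤ f ∧ f < 18))).map (fun f => PySem.Int.toStr (PySem.Int.mod f 9 + 1))) with hs2
  set s3 := PySem.Str.join "" ((M.filter (fun f => decide (18 ≤ f ∧ f < 27))).map (fun f => PySem.Int.toStr (PySem.Int.mod f 9 + 1))) with hs3
  set s4 := PySem.Str.join "" ((M.filter (fun f => decide (27 ≤ f))).map (fun f => PySem.Dict.getD lettersB f "")) with hs4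
  clear_value s1 s2 s3 s4
  -- final assembly: compare on the character-list side
  apply String.toList_inj.mp
  split_ifs <;>
    simp_all [PySem.Str.toList_join, join_nil_flatten, String.toList_append]
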